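-- pv_equiv track=rewrite | github.com/Inkiu/Algorithm | src/main/python/auto_fill.py | sort_solution
-- ===== SOURCE A (Python) =====
-- def min_index(a, b):
--     for i in range(len(a)):
--         if i == len(b) or a[i] != b[i]:
--             return i + 1
--     return len(a)
--
-- def sort_solution(words):
--     words.sort()
--     ans = 0
--     for i in range(len(words)):
--         if i == 0:
--             ans += min_index(words[i], words[i + 1])
--         elif i == len(words) - 1:
--             ans += min_index(words[i], words[i - 1])
--         else:
--             ans += max(min_index(words[i], words[i - 1]), min_index(words[i], words[i + 1]))
--
--     return ans
-- ===== SOURCE B (Python) =====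
-- def shortest_unique(count, w):
--     for L in range(1, len(w) + 1):
--         if count[w[:L]] == 1:
--             return L
--     return len(w)
--
-- def sort_solution(words):
--     count = {}
--     for w in words:
--         for L in range(1, len(w) + 1):
--             p = w[:L]
--             count[p] = count.get(p, 0) + 1
--     total = 0
--     for w in words:
--         total += shortest_unique(count, w)
--     return total
-- ===== Notes on version B (the rewrite author's own statement) =====
-- stated objective: alternative
-- what changed: A sorts the list and, per index, rescans both sorted neighbours with min_index; B never sorts: it builds a hash count of every prefix of every word in one pass and then, per word, returns the length of its shortest prefix whose count is 1 (its full length if none), summing these.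
-- outside the precondition, e.g. on sort_solution(['ab']): A raises IndexError, B returns 1
import Mathlib
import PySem

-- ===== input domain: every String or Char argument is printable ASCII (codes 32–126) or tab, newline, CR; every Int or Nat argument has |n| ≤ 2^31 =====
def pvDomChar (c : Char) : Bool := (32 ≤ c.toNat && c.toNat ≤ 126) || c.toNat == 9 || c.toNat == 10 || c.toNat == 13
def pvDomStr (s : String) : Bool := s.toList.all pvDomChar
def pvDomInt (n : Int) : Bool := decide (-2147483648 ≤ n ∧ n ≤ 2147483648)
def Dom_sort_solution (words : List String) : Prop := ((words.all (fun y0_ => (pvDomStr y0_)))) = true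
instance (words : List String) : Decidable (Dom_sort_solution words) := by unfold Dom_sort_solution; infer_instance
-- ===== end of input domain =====

-- B replaces A's sort-and-rescan-both-neighbours computation by a sort-free hash count of all
-- word prefixes and a shortest-unique-prefix search per word (objective: alternative).
-- In Python A sorts the argument list in place and B does not mutate it; the equivalence
-- proved here is about the RETURN value only.

-- ===== PORT A =====
-- min_index's loop over i in range(len(a)): 'i == len(b)' is b exhausted, else compare a[i], b[i]
-- (both indices are in range at that point, so structural recursion is exact).
def pvMinIndexGo : List Char → List Char → Int → Int
  | [], _, i => i                    -- loop ran out: return len(a)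
  | _ :: _, [], i => i + 1           -- i == len(b)
  | x :: xs, y :: ys, i => if x ≠ y then i + 1 else pvMinIndexGo xs ys (i + 1)

def pvMinIndex (a b : String) : Int := pvMinIndexGo a.toList b.toList 0

def sort_solution (words : List String) : Int :=
  let ws := PySem.List.sorted words (fun x => x) false
  (PySem.List.pyRange 0 (PySem.List.len ws) 1).foldl (fun ans i =>
    if i = 0 then
      ans + pvMinIndex (PySem.List.pyGetD ws i "") (PySem.List.pyGetD ws (i + 1) "")
    else if i = PySem.List.len ws - 1 then
      ans + pvMinIndex (PySem.List.pyGetD ws i "") (PySem.List.pyGetD ws (i - 1) "")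
    else
      ans + max (pvMinIndex (PySem.List.pyGetD ws i "") (PySem.List.pyGetD ws (i - 1) ""))
                (pvMinIndex (PySem.List.pyGetD ws i "") (PySem.List.pyGetD ws (i + 1) ""))) 0

-- ===== PORT B =====
-- shortest_unique(count, w): first L in 1..len(w) with count[w[:L]] == 1, else len(w).
-- (count[p] is ported as getD _ 0: the probed key is one of w's own prefixes, which the
-- building loop inserted, so the KeyError branch of Python's count[p] is unreachable.)
def pvShortestUnique (count : PySem.Dict String Int) (w : String) : Int :=
  match (PySem.List.pyRange 1 (PySem.Str.len w + 1)).find?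
      (fun L => count.getD (PySem.Str.slice w none (some L)) 0 == 1) with
  | some L => L
  | none => PySem.Str.len w

def sort_solution_alt (words : List String) : Int :=
  let count := words.foldl (fun d w =>
    (PySem.List.pyRange 1 (PySem.Str.len w + 1)).foldl (fun d L =>
      d.insert (PySem.Str.slice w none (some L))
        (d.getD (PySem.Str.slice w none (some L)) 0 + 1)) d) PySem.Dict.empty
  words.foldl (fun total w => total + pvShortestUnique count w) 0

-- ===== PRECONDITION & SPEC =====
-- Pre_ excludes exactly the single-element lists, on which A raises IndexError
-- (words[i + 1] at i = 0); A returns normally on every other input.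
def Pre_sort_solution (words : List String) : Prop := words.length ≠ 1
instance (words : List String) : Decidable (Pre_sort_solution words) := by
  unfold Pre_sort_solution; infer_instance

def pvWitness_sort_solution : List String := ["bell", "bear", "be"]

def Spec_sort_solution (words : List String) (out : Int) : Prop := out = sort_solution_alt words
instance (words : List String) (out : Int) : Decidable (Spec_sort_solution words out) := by
  unfold Spec_sort_solution; infer_instance

-- ===== CLAIM (what is proved, stated in full; the proofs are below) =====
def Claim_equal_sort_solution : Prop := ∀ (words : List String), Dom_sort_solution words → Pre_sort_solution words → Spec_sort_solution words (sort_solution words)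

-- ===== LEMMAS AND PROOFS =====

-- the common-prefix length of two character lists, as an Int
def pvLcp : List Char → List Char → Int
  | x :: xs, y :: ys => if x = y then 1 + pvLcp xs ys else 0
  | _, _ => 0

theorem pvMinIndexGo_eq (a b : List Char) (i : Int) :
    pvMinIndexGo a b i = i + min (pvLcp a b + 1) (a.length : Int) := by
  induction a generalizing b i with
  | nil => cases b <;> simp [pvMinIndexGo, pvLcp]
  | cons x xs ih =>
    cases b with
    | nil =>
      show i + 1 = i + min (pvLcp (x :: xs) [] + 1) ((x :: xs).length : Int)
      simp [pvLcp]
    | cons y ys =>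
      show (if x ≠ y then i + 1 else pvMinIndexGo xs ys (i + 1)) = _
      by_cases hxy : x = y
      · rw [if_neg (by simp [hxy]), ih]
        simp [pvLcp, hxy]
        omega
      · rw [if_pos hxy]
        simp [pvLcp, hxy]

theorem pvMinIndex_eq (a b : String) :
    pvMinIndex a b = min (pvLcp a.toList b.toList + 1) (a.toList.length : Int) := by
  simp [pvMinIndex, pvMinIndexGo_eq]

theorem pvLcp_nonneg (a b : List Char) : 0 ≤ pvLcp a b := by
  induction a generalizing b with
  | nil => cases b <;> simp [pvLcp]
  | cons x xs ih =>
    cases b with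
    | nil => simp [pvLcp]
    | cons y ys =>
      by_cases hxy : x = y
      · simp only [pvLcp, if_pos hxy]; have := ih ys; omega
      · simp [pvLcp, hxy]

theorem take_prefix_iff_lcp (a u : List Char) (L : Nat) (h : L ≤ a.length) :
    a.take L <+: u ↔ (L : Int) ≤ pvLcp a u := by
  induction a generalizing u L with
  | nil =>
    simp at h; subst h; simp
    exact pvLcp_nonneg [] u
  | cons x xs ih =>
    cases L with
    | zero => simpa using pvLcp_nonneg (x :: xs) u
    | succ L' =>
      cases u with
      | nil =>
        simp [pvLcp]
      | cons y ys =>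
        by_cases hxy : x = y
        · subst hxy
          simp only [List.take_succ_cons, pvLcp, List.cons_prefix_cons, true_and]
          rw [ih ys L' (by simpa using h)]
          push_cast; omega
        · simp only [List.take_succ_cons, pvLcp, if_neg hxy, List.cons_prefix_cons]
          constructor
          · rintro ⟨h1, _⟩; exact absurd h1 hxy
          · intro hh; omega

theorem pv_cons_le_cons (x y : Char) (a b : List Char) :
    ((x :: a : List Char) ≤ y :: b) ↔ x < y ∨ (x = y ∧ a ≤ b) := by
  rw [← not_lt, ← not_lt]
  show ¬ List.Lex (· < ·) (y :: b) (x :: a) ↔ _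
  rw [List.cons_lex_cons_iff]
  have hnl : (¬ b < a) ↔ ¬ List.Lex (· < ·) b a := Iff.rfl
  constructor
  · intro h
    rcases lt_trichotomy x y with h1 | h1 | h1
    · exact Or.inl h1
    · exact Or.inr ⟨h1, hnl.mpr (fun hlex => h (Or.inr ⟨h1.symm, hlex⟩))⟩
    · exact absurd (Or.inl h1) h
  · rintro (h1 | ⟨rfl, h1⟩) (h2 | ⟨h2a, h2⟩)
    · exact absurd h1 (lt_asymm h2)
    · subst h2a; exact lt_irrefl _ h1
    · exact lt_irrefl _ h2
    · exact (hnl.mp h1) h2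

theorem pv_not_cons_le_nil (x : Char) (a : List Char) : ¬ ((x :: a : List Char) ≤ []) := by
  rw [← not_lt]
  intro h; exact h List.Lex.nil

theorem pv_sandwich (p a b c : List Char) (hab : a ≤ b) (hbc : b ≤ c)
    (hpa : p <+: a) (hpc : p <+: c) : p <+: b := by
  induction p generalizing a b c with
  | nil => exact List.nil_prefix
  | cons x p' ih =>
    obtain ⟨a', rfl⟩ := hpa
    obtain ⟨c', rfl⟩ := hpc
    cases b with
    | nil => exact absurd hab (by simpa using pv_not_cons_le_nil x (p' ++ a'))
    | cons y b' =>
      rw [List.cons_append, pv_cons_le_cons] at hab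
      rw [List.cons_append, pv_cons_le_cons] at hbc
      have hxy : y = x := by
        rcases hab with h1 | ⟨h1, _⟩ <;> rcases hbc with h2 | ⟨h2, _⟩
        · exact absurd h2 (lt_asymm h1)
        · exact h2
        · exact absurd (h1 ▸ h2) (lt_irrefl _)
        · exact h2
      subst hxy
      have h1 : p' ++ a' ≤ b' := by
        rcases hab with h1 | ⟨_, h1⟩
        · exact absurd h1 (lt_irrefl _)
        · exact h1
      have h2 : b' ≤ p' ++ c' := by
        rcases hbc with h2 | ⟨_, h2⟩
        · exact absurd h2 (lt_irrefl _)
        · exact h2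
      rw [List.cons_prefix_cons]
      exact ⟨rfl, ih (p' ++ a') b' (p' ++ c') h1 h2 (List.prefix_append _ _) (List.prefix_append _ _)⟩

theorem pyRange_nil (a b : Int) (h : b ≤ a) : PySem.List.pyRange a b = [] := by
  unfold PySem.List.pyRange; simp [show ¬ (a < b) by omega]

theorem nodup_pyRange (a b : Int) : (PySem.List.pyRange a b).Nodup := by
  unfold PySem.List.pyRange
  split
  · exact List.nodup_nil
  · refine (List.nodup_range).map ?_
    intro x y h; simpa using h

theorem pv_find?_congr {α : Type} (l : List α) (p q : α → Bool)
    (h : ∀ x ∈ l, p x = q x) : l.find? p = l.find? q := by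
  induction l with
  | nil => rfl
  | cons x xs ih =>
    rw [List.find?_cons, List.find?_cons, h x (by simp)]
    split
    · rfl
    · exact ih (fun y hy => h y (by simp [hy]))

theorem find?_pyRange_upclosed (a b K : Int) :
    (PySem.List.pyRange a b).find? (fun L => decide (K < L)) =
      if a < b then
        (if K < a then some a else if K + 1 < b then some (K + 1) else none)
      else none := by
  by_cases hab : a < b
  · rw [if_pos hab]
    obtain ⟨n, hn⟩ : ∃ n : Nat, b - a = n := ⟨(b - a).toNat, by omega⟩
    induction n generalizing a with
    | zero => omega
    | succ m ih =>
      rw [PySem.List.pyRange_one_cons hab, List.find?_cons]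
      by_cases hKa : K < a
      · rw [if_pos hKa]
        simp [hKa]
      · rw [if_neg hKa]
        have hstep : (decide (K < a)) = false := by simp [hKa]
        rw [hstep]
        by_cases hab2 : a + 1 < b
        · rw [ih (a + 1) hab2 (by omega)]
          by_cases hKa1 : K < a + 1
          · have : K = a := by omega
            subst this
            simp [show K + 1 < b by omega]
          · simp [hKa1]
        · have hnil : PySem.List.pyRange (a + 1) b = [] := pyRange_nil _ _ (by omega)
          rw [hnil]
          simp [show ¬ (K + 1 < b) by omega]
  · rw [if_neg hab, pyRange_nil _ _ (by omega)]
    rfl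

-- w[:L] as a character list
theorem slice_toList (w : String) (L : Int) (h : 0 ≤ L) :
    (PySem.Str.slice w none (some L)).toList = w.toList.take L.toNat := by
  simp [PySem.Str.slice, PySem.List.slice_to _ h]

-- the list of keys the inner building loop inserts for word w
def pvPrefixes (w : String) : List String :=
  (PySem.List.pyRange 1 (PySem.Str.len w + 1)).map (fun L => PySem.Str.slice w none (some L))

def pvBuild (words : List String) : PySem.Dict String Int :=
  words.foldl (fun d w =>
    (PySem.List.pyRange 1 (PySem.Str.len w + 1)).foldl (fun d L =>
      d.insert (PySem.Str.slice w none (some L))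
        (d.getD (PySem.Str.slice w none (some L)) 0 + 1)) d) PySem.Dict.empty

theorem mem_pvPrefixes (w p : String) :
    p ∈ pvPrefixes w ↔ p.toList ≠ [] ∧ p.toList <+: w.toList := by
  unfold pvPrefixes
  simp only [List.mem_map, PySem.List.mem_pyRange_one]
  constructor
  · rintro ⟨L, ⟨hL1, hL2⟩, rfl⟩
    rw [PySem.Str.len_eq] at hL2
    constructor
    · rw [slice_toList _ _ (by omega)]
      intro hnil
      rw [List.take_eq_nil_iff] at hnil
      rcases hnil with h | h
      · omega
      · rw [h] at hL2; simp at hL2; omega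
    · rw [slice_toList _ _ (by omega)]
      exact List.take_prefix _ _
  · rintro ⟨hne, hpre⟩
    refine ⟨(p.toList.length : Int), ⟨by
        have : p.toList.length ≠ 0 := by simpa using hne
        omega, by
        rw [PySem.Str.len_eq]
        have := hpre.length_le
        omega⟩, ?_⟩
    apply String.ext
    rw [slice_toList _ _ (by omega)]
    simp only [Int.toNat_natCast]
    exact (List.prefix_iff_eq_take.mp hpre).symm

theorem nodup_pvPrefixes (w : String) : (pvPrefixes w).Nodup := by
  unfold pvPrefixes
  refine List.Nodup.map_on ?_ (nodup_pyRange _ _)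
  intro L1 h1 L2 h2 heq
  rw [PySem.List.mem_pyRange_one, PySem.Str.len_eq] at h1 h2
  have := congrArg (fun s => s.toList.length) heq
  simp only [slice_toList _ _ (by omega : (0:Int) ≤ L1), slice_toList _ _ (by omega : (0:Int) ≤ L2),
    List.length_take] at this
  omega

theorem count_pvPrefixes (w p : String) (hp : p.toList ≠ []) :
    (pvPrefixes w).count p = if p.toList <+: w.toList then 1 else 0 := by
  by_cases hmem : p ∈ pvPrefixes w
  · rw [if_pos ((mem_pvPrefixes w p).mp hmem).2]
    exact List.count_eq_one_of_mem (nodup_pvPrefixes w) hmem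
  · rw [List.count_eq_zero_of_not_mem hmem]
    rw [mem_pvPrefixes] at hmem
    simp only [hp, ne_eq] at hmem
    rw [if_neg (by tauto)]

theorem getD_build_general (words : List String) (d : PySem.Dict String Int) (p : String) :
    (words.foldl (fun d w =>
      (PySem.List.pyRange 1 (PySem.Str.len w + 1)).foldl (fun d L =>
        d.insert (PySem.Str.slice w none (some L))
          (d.getD (PySem.Str.slice w none (some L)) 0 + 1)) d) d).getD p 0
    = d.getD p 0 + (words.map (fun w => ((pvPrefixes w).count p : Int))).sum := by
  induction words generalizing d with
  | nil => simp
  | cons w ws ih =>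
    rw [List.foldl_cons, ih, List.map_cons, List.sum_cons]
    have hinner : (PySem.List.pyRange 1 (PySem.Str.len w + 1)).foldl (fun d L =>
        d.insert (PySem.Str.slice w none (some L))
          (d.getD (PySem.Str.slice w none (some L)) 0 + 1)) d
        = (pvPrefixes w).foldl (fun d q => d.insert q (d.getD q 0 + 1)) d := by
      unfold pvPrefixes
      rw [List.foldl_map]
    rw [hinner, PySem.Dict.getD_foldl_insert_add_one]
    ring

theorem getD_pvBuild (words : List String) (p : String) (hp : p.toList ≠ []) :
    (pvBuild words).getD p 0 = (words.countP (fun u => p.toList.isPrefixOf u.toList) : Int) := by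
  unfold pvBuild
  rw [getD_build_general]
  have hmap : words.map (fun w => ((pvPrefixes w).count p : Int))
      = words.map (fun u => if (p.toList.isPrefixOf u.toList) = true then (1 : Int) else 0) := by
    refine List.map_congr_left (fun w _ => ?_)
    rw [count_pvPrefixes _ _ hp]
    by_cases h : p.toList <+: w.toList
    · simp [h, List.isPrefixOf_iff_prefix]
    · simp [h, List.isPrefixOf_iff_prefix]
  rw [hmap, PySem.List.sum_map_ite_one_zero]
  simp

-- the largest common-prefix length of ws[i] with an existing sorted neighbour
def pvK (ws : List String) (i : Nat) : Int :=
  if i = 0 then pvLcp ((ws.getD 0 "").toList) ((ws.getD 1 "").toList)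
  else if i = ws.length - 1 then pvLcp ((ws.getD i "").toList) ((ws.getD (i - 1) "").toList)
  else max (pvLcp ((ws.getD i "").toList) ((ws.getD (i - 1) "").toList))
           (pvLcp ((ws.getD i "").toList) ((ws.getD (i + 1) "").toList))

theorem pv_crux (words : List String) (i L : Nat)
    (h2 : 2 ≤ (PySem.List.sorted words (fun x => x) false).length)
    (hi : i < (PySem.List.sorted words (fun x => x) false).length)
    (_hL1 : 1 ≤ L)
    (hL : L ≤ (((PySem.List.sorted words (fun x => x) false).getD i "").toList).length) :
    ((PySem.List.sorted words (fun x => x) false).countP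
        (fun u => (((PySem.List.sorted words (fun x => x) false).getD i "").toList.take L).isPrefixOf u.toList) = 1)
      ↔ pvK (PySem.List.sorted words (fun x => x) false) i < (L : Int) := by
  set ws := PySem.List.sorted words (fun x => x) false with hws
  have hgetDi : ws.getD i "" = ws[i]'hi := List.getD_eq_getElem ws "" hi
  set wT := (ws[i]'hi).toList with hwT
  rw [hgetDi] at hL ⊢
  set p := wT.take L with hp
  set P : String → Bool := fun u => p.isPrefixOf u.toList with hP
  have hmono : ∀ (a b : Nat) (hab : a ≤ b) (hb : b < ws.length), ws[a]'(by omega) ≤ ws[b]'hb := by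
    intro a b hab hb
    exact PySem.List.sorted_id_getElem_mono words hab hb
  have hPiff : ∀ (u : String), (P u = true) ↔ (L : Int) ≤ pvLcp wT u.toList := by
    intro u
    rw [hP, hp]
    simp only []
    rw [List.isPrefixOf_iff_prefix]
    exact take_prefix_iff_lcp wT u.toList L hL
  -- split the sorted list at position i
  have hsplit : ws = ws.take i ++ (ws[i]'hi) :: ws.drop (i + 1) := by
    conv_lhs => rw [← List.take_append_drop i ws]
    rw [List.getElem_cons_drop]
  have hself : P (ws[i]'hi) = true := by
    rw [hP]; simp only []
    rw [List.isPrefixOf_iff_prefix, hp]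
    exact List.take_prefix _ _
  have hcount : ws.countP P = (ws.take i).countP P + ((ws.drop (i + 1)).countP P + 1) := by
    conv_lhs => rw [hsplit]
    rw [List.countP_append, List.countP_cons, hself]
    simp
  -- the two neighbour conditions
  have key : ws.countP P = 1 ↔
      ((∀ _ : 1 ≤ i, pvLcp wT ((ws[i - 1]'(by omega)).toList) < (L : Int)) ∧
       (∀ hj : i + 1 < ws.length, pvLcp wT ((ws[i + 1]'hj).toList) < (L : Int))) := by
    constructor
    · intro h1
      have hz : (ws.take i).countP P = 0 ∧ (ws.drop (i + 1)).countP P = 0 := by omega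
      constructor
      · intro hj
        have hmem : ws[i - 1]'(by omega) ∈ ws.take i := by
          rw [List.mem_take_iff_getElem]
          exact ⟨i - 1, by omega, rfl⟩
        have := List.countP_eq_zero.mp hz.1 _ hmem
        have hnot : ¬ ((L : Int) ≤ pvLcp wT ((ws[i - 1]'(by omega)).toList)) := by
          intro hle
          exact this ((hPiff _).mpr hle)
        omega
      · intro hj
        have hmem : ws[i + 1]'hj ∈ ws.drop (i + 1) := by
          rw [List.mem_drop_iff_getElem]
          exact ⟨0, by omega, by norm_num⟩
        have := List.countP_eq_zero.mp hz.2 _ hmem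
        have hnot : ¬ ((L : Int) ≤ pvLcp wT ((ws[i + 1]'hj).toList)) := by
          intro hle
          exact this ((hPiff _).mpr hle)
        omega
    · rintro ⟨hl, hr⟩
      have hzl : (ws.take i).countP P = 0 := by
        rw [List.countP_eq_zero]
        intro u hu hPu
        rw [List.mem_take_iff_getElem] at hu
        obtain ⟨j, hjm, rfl⟩ := hu
        have hji : j < i := by omega
        have h1i : 1 ≤ i := by omega
        have hneigh : P (ws[i - 1]'(by omega)) = true := by
          rw [hP]; simp only []
          rw [List.isPrefixOf_iff_prefix]
          refine pv_sandwich p ((ws[j]'(by omega)).toList) ((ws[i - 1]'(by omega)).toList) wT ?_ ?_ ?_ ?_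
          · exact String.le_iff_toList_le.mp (hmono j (i - 1) (by omega) (by omega))
          · exact String.le_iff_toList_le.mp (hmono (i - 1) i (by omega) hi)
          · exact List.isPrefixOf_iff_prefix.mp hPu
          · rw [hp]; exact List.take_prefix _ _
        have := (hPiff _).mp hneigh
        have := hl h1i
        omega
      have hzr : (ws.drop (i + 1)).countP P = 0 := by
        rw [List.countP_eq_zero]
        intro u hu hPu
        rw [List.mem_drop_iff_getElem] at hu
        obtain ⟨j, hjm, rfl⟩ := hu
        have hj1 : i + 1 < ws.length := by omega
        have hneigh : P (ws[i + 1]'hj1) = true := by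
          rw [hP]; simp only []
          rw [List.isPrefixOf_iff_prefix]
          refine pv_sandwich p wT ((ws[i + 1]'hj1).toList) ((ws[i + 1 + j]'(by omega)).toList) ?_ ?_ ?_ ?_
          · exact String.le_iff_toList_le.mp (hmono i (i + 1) (by omega) hj1)
          · exact String.le_iff_toList_le.mp (hmono (i + 1) (i + 1 + j) (by omega) (by omega))
          · rw [hp]; exact List.take_prefix _ _
          · exact List.isPrefixOf_iff_prefix.mp hPu
        have := (hPiff _).mp hneigh
        have := hr hj1
        omega
      omega
  rw [key]
  rw [hwT]
  -- branch arithmetic: pvK is the max over the existing neighbours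
  unfold pvK
  by_cases h0 : i = 0
  · subst h0
    have h1 : (1 : Nat) < ws.length := by omega
    rw [if_pos rfl]
    rw [List.getD_eq_getElem ws "" hi, List.getD_eq_getElem ws "" h1]
    constructor
    · rintro ⟨_, hr⟩; exact hr h1
    · intro h; exact ⟨by omega, fun _ => h⟩
  · rw [if_neg h0]
    by_cases hlast : i = ws.length - 1
    · rw [if_pos hlast]
      have h1i : 1 ≤ i := by omega
      rw [List.getD_eq_getElem ws "" hi, List.getD_eq_getElem ws "" (by omega : i - 1 < ws.length)]
      constructor
      · rintro ⟨hl, _⟩; exact hl h1i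
      · intro h; exact ⟨fun _ => h, by omega⟩
    · rw [if_neg hlast]
      have h1i : 1 ≤ i := by omega
      have hi1 : i + 1 < ws.length := by omega
      rw [List.getD_eq_getElem ws "" hi, List.getD_eq_getElem ws "" (by omega : i - 1 < ws.length),
        List.getD_eq_getElem ws "" hi1]
      constructor
      · rintro ⟨hl, hr⟩
        have := hl h1i
        have := hr hi1
        omega
      · intro h
        exact ⟨fun _ => by omega, fun _ => by omega⟩

theorem pvShortest_eq_min (words : List String) (i : Nat)
    (h2 : 2 ≤ (PySem.List.sorted words (fun x => x) false).length)
    (hi : i < (PySem.List.sorted words (fun x => x) false).length) :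
    pvShortestUnique (pvBuild words) ((PySem.List.sorted words (fun x => x) false).getD i "")
      = min (pvK (PySem.List.sorted words (fun x => x) false) i + 1)
          (((((PySem.List.sorted words (fun x => x) false).getD i "").toList).length : Int)) := by
  set ws := PySem.List.sorted words (fun x => x) false with hws
  have hgetDi : ws.getD i "" = ws[i]'hi := List.getD_eq_getElem ws "" hi
  rw [hgetDi]
  set w := ws[i]'hi with hw
  set K := pvK ws i with hK
  have hKnn : 0 ≤ K := by
    rw [hK]; unfold pvK
    split
    · exact pvLcp_nonneg _ _
    · split
      · exact pvLcp_nonneg _ _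
      · exact le_max_of_le_left (pvLcp_nonneg _ _)
  unfold pvShortestUnique
  rw [PySem.Str.len_eq]
  set lenN := w.toList.length with hlen
  have hcong : ∀ Lz ∈ PySem.List.pyRange 1 ((lenN : Int) + 1),
      (((pvBuild words).getD (PySem.Str.slice w none (some Lz)) 0 == 1))
        = decide (K < Lz) := by
    intro Lz hLz
    rw [PySem.List.mem_pyRange_one] at hLz
    have hzn : Lz = ((Lz.toNat : Nat) : Int) := by omega
    set L : Nat := Lz.toNat with hLdef
    have hL1 : 1 ≤ L := by omega
    have hLle : L ≤ lenN := by omega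
    have hq : (PySem.Str.slice w none (some Lz)).toList = w.toList.take L := by
      rw [slice_toList _ _ (by omega)]
    have hqne : (PySem.Str.slice w none (some Lz)).toList ≠ [] := by
      rw [hq]
      intro hnil
      rw [List.take_eq_nil_iff] at hnil
      rcases hnil with h | h
      · omega
      · rw [hlen, h] at hLle; simp at hLle; omega
    rw [getD_pvBuild words _ hqne]
    have hperm : words.countP (fun u => (PySem.Str.slice w none (some Lz)).toList.isPrefixOf u.toList)
        = ws.countP (fun u => (PySem.Str.slice w none (some Lz)).toList.isPrefixOf u.toList) :=
      (List.Perm.countP_eq _ (PySem.List.sorted_perm words (fun x => x) false)).symm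
    rw [hperm]
    have hcrux := pv_crux words i L h2 hi hL1 (by rw [hgetDi]; exact hLle)
    rw [hgetDi] at hcrux
    rw [Bool.eq_iff_iff]
    simp only [beq_iff_eq, decide_eq_true_eq]
    rw [show (1 : Int) = ((1 : Nat) : Int) by norm_num, Int.natCast_inj]
    simp only [hq]
    rw [hcrux, ← hK]
    omega
  rw [pv_find?_congr _ _ _ hcong, find?_pyRange_upclosed 1 ((lenN : Int) + 1) K]
  by_cases h0 : (1 : Int) < (lenN : Int) + 1
  · rw [if_pos h0]
    by_cases hK1 : K < 1
    · rw [if_pos hK1]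
      simp only []
      omega
    · rw [if_neg hK1]
      by_cases hK2 : K + 1 < (lenN : Int) + 1
      · rw [if_pos hK2]
        simp only []
        omega
      · rw [if_neg hK2]
        simp only []
        omega
  · rw [if_neg h0]
    simp only []
    omega

theorem foldl_ite3 {c1 c2 : Int → Prop} [DecidablePred c1] [DecidablePred c2]
    (f1 f2 f3 : Int → Int) (l : List Int) (a : Int) :
    l.foldl (fun ans i => if c1 i then ans + f1 i else if c2 i then ans + f2 i else ans + f3 i) a
      = a + (l.map (fun i => if c1 i then f1 i else if c2 i then f2 i else f3 i)).sum := by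
  induction l generalizing a with
  | nil => simp
  | cons x xs ih =>
    rw [List.foldl_cons, ih, List.map_cons, List.sum_cons]
    split_ifs <;> ring

theorem termA_eq_min (words : List String) (i : Int)
    (h2 : 2 ≤ (PySem.List.sorted words (fun x => x) false).length)
    (h0 : 0 ≤ i) (hi : i < ((PySem.List.sorted words (fun x => x) false).length : Int)) :
    (if i = 0 then
      pvMinIndex (PySem.List.pyGetD (PySem.List.sorted words (fun x => x) false) i "")
        (PySem.List.pyGetD (PySem.List.sorted words (fun x => x) false) (i + 1) "")
    else if i = PySem.List.len (PySem.List.sorted words (fun x => x) false) - 1 then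
      pvMinIndex (PySem.List.pyGetD (PySem.List.sorted words (fun x => x) false) i "")
        (PySem.List.pyGetD (PySem.List.sorted words (fun x => x) false) (i - 1) "")
    else
      max (pvMinIndex (PySem.List.pyGetD (PySem.List.sorted words (fun x => x) false) i "")
            (PySem.List.pyGetD (PySem.List.sorted words (fun x => x) false) (i - 1) ""))
          (pvMinIndex (PySem.List.pyGetD (PySem.List.sorted words (fun x => x) false) i "")
            (PySem.List.pyGetD (PySem.List.sorted words (fun x => x) false) (i + 1) "")))
    = min (pvK (PySem.List.sorted words (fun x => x) false) i.toNat + 1)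
        (((((PySem.List.sorted words (fun x => x) false).getD i.toNat "").toList).length : Int)) := by
  set ws := PySem.List.sorted words (fun x => x) false with hws
  simp only [PySem.List.len_eq]
  have e0 : PySem.List.pyGetD ws i "" = ws.getD i.toNat "" := by
    rw [PySem.List.pyGetD_eq_getElem ws "" h0 hi, List.getD_eq_getElem ws "" (by omega)]
  unfold pvK
  by_cases hi0 : i = 0
  · subst hi0
    rw [if_pos rfl, if_pos (show (0 : Int).toNat = 0 by norm_num)]
    have e1 : PySem.List.pyGetD ws (0 + 1) "" = ws.getD 1 "" := by
      rw [PySem.List.pyGetD_eq_getElem ws "" (by omega) (by omega),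
        List.getD_eq_getElem ws "" (by omega)]
      norm_num
    rw [e0, e1, pvMinIndex_eq]
    norm_num
  · rw [if_neg hi0, if_neg (show ¬ (i.toNat = 0) by omega)]
    by_cases hilast : i = (ws.length : Int) - 1
    · rw [if_pos hilast, if_pos (show i.toNat = ws.length - 1 by omega)]
      have e1 : PySem.List.pyGetD ws (i - 1) "" = ws.getD (i.toNat - 1) "" := by
        rw [PySem.List.pyGetD_eq_getElem ws "" (by omega) (by omega),
          List.getD_eq_getElem ws "" (by omega)]
        congr 1
        omega
      rw [e0, e1, pvMinIndex_eq]
    · rw [if_neg hilast, if_neg (show ¬ (i.toNat = ws.length - 1) by omega)]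
      have e1 : PySem.List.pyGetD ws (i - 1) "" = ws.getD (i.toNat - 1) "" := by
        rw [PySem.List.pyGetD_eq_getElem ws "" (by omega) (by omega),
          List.getD_eq_getElem ws "" (by omega)]
        congr 1
        omega
      have e2 : PySem.List.pyGetD ws (i + 1) "" = ws.getD (i.toNat + 1) "" := by
        rw [PySem.List.pyGetD_eq_getElem ws "" (by omega) (by omega),
          List.getD_eq_getElem ws "" (by omega)]
        congr 1
        omega
      rw [e0, e1, e2, pvMinIndex_eq, pvMinIndex_eq]
      omega

theorem pv_main (words : List String) (h : words.length ≠ 1) :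
    sort_solution words = sort_solution_alt words := by
  by_cases hnil : words = []
  · subst hnil
    decide
  · have h2 : 2 ≤ (PySem.List.sorted words (fun x => x) false).length := by
      rw [PySem.List.length_sorted]
      have : words.length ≠ 0 := by simpa [List.length_eq_zero_iff] using hnil
      omega
    set ws := PySem.List.sorted words (fun x => x) false with hws
    have hA : sort_solution words =
        ((PySem.List.pyRange 0 (PySem.List.len ws)).map (fun i =>
          if i = 0 then
            pvMinIndex (PySem.List.pyGetD ws i "") (PySem.List.pyGetD ws (i + 1) "")
          else if i = PySem.List.len ws - 1 then
            pvMinIndex (PySem.List.pyGetD ws i "") (PySem.List.pyGetD ws (i - 1) "")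
          else
            max (pvMinIndex (PySem.List.pyGetD ws i "") (PySem.List.pyGetD ws (i - 1) ""))
                (pvMinIndex (PySem.List.pyGetD ws i "") (PySem.List.pyGetD ws (i + 1) "")))).sum := by
      unfold sort_solution
      rw [← hws]
      refine Eq.trans (foldl_ite3 (c1 := fun i => i = 0) (c2 := fun i => i = PySem.List.len ws - 1)
        (fun i => pvMinIndex (PySem.List.pyGetD ws i "") (PySem.List.pyGetD ws (i + 1) ""))
        (fun i => pvMinIndex (PySem.List.pyGetD ws i "") (PySem.List.pyGetD ws (i - 1) ""))
        (fun i => max (pvMinIndex (PySem.List.pyGetD ws i "") (PySem.List.pyGetD ws (i - 1) ""))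
                      (pvMinIndex (PySem.List.pyGetD ws i "") (PySem.List.pyGetD ws (i + 1) "")))
        (PySem.List.pyRange 0 (PySem.List.len ws)) 0) ?_
      rw [zero_add]
    have hB : sort_solution_alt words =
        (words.map (fun w => pvShortestUnique (pvBuild words) w)).sum := by
      show words.foldl (fun total w => total + pvShortestUnique (pvBuild words) w) 0 = _
      rw [PySem.List.foldl_add, zero_add]
    rw [hA, hB]
    have hperm : (words.map (fun w => pvShortestUnique (pvBuild words) w)).sum
        = (ws.map (fun w => pvShortestUnique (pvBuild words) w)).sum :=
      (List.Perm.sum_eq (List.Perm.map _ (PySem.List.sorted_perm words (fun x => x) false))).symm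
    rw [hperm]
    have hidx : ws.map (fun w => pvShortestUnique (pvBuild words) w)
        = (PySem.List.pyRange 0 (PySem.List.len ws)).map (fun j =>
            pvShortestUnique (pvBuild words) (PySem.List.pyGetD ws j "")) := by
      conv_lhs => rw [← PySem.List.map_pyGetD_pyRange_zero ws ""]
      rw [List.map_map]
      rfl
    rw [hidx]
    refine congrArg List.sum (List.map_congr_left ?_)
    intro i hi
    rw [PySem.List.mem_pyRange_one, PySem.List.len_eq] at hi
    have hiN : i.toNat < ws.length := by omega
    have hgd : PySem.List.pyGetD ws i "" = ws.getD i.toNat "" := by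
      rw [PySem.List.pyGetD_eq_getElem ws "" (by omega) (by omega),
        List.getD_eq_getElem ws "" (by omega)]
    rw [termA_eq_min words i h2 (by omega) (by rw [← hws]; omega), hgd,
      pvShortest_eq_min words i.toNat h2 hiN]

-- ===== VERDICT (by name: the statement is the Claim_ definition above) =====
theorem sort_solution_spec : Claim_equal_sort_solution := by
  intro words _ hpre
  unfold Spec_sort_solution
  exact pv_main words hpre
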